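-- pv_equiv track=rewrite | github.com/VaggM/IEEEXtremeCountdown | IEEEXtreme12_13/UPatras/dfs (25)X&T.py | dfs
-- ===== SOURCE A (Python) =====
-- def dfs(graph, root, node, parent, dist):
--     total = 0
--     for child, w in graph[node]:
--         if child == parent:
--             continue
--         new_dist = max(dist, w)
--         total += new_dist + dfs(graph, root, child, node, new_dist)
--
--     return total
-- ===== SOURCE B (Python) =====
-- def dfs(graph, root, node, parent, dist):
--     # Iterative explicit-stack DFS instead of recursion; same sum, no RecursionError on deep trees.
--     total = 0
--     stack = [(node, parent, dist)]
--     while stack: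
--         cur, par, d = stack.pop()
--         for child, w in graph[cur]:
--             if child == par:
--                 continue
--             nd = max(d, w)
--             total += nd
--             stack.append((child, cur, nd))
--     return total
-- ===== Notes on version B (the rewrite author's own statement) =====
-- stated objective: alternative
-- what changed: The recursive DFS is replaced by an iterative DFS with an explicit stack of (node, parent, dist) frames accumulating the same order-independent sum, so B never hits Python's recursion limit.
import Mathlib
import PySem

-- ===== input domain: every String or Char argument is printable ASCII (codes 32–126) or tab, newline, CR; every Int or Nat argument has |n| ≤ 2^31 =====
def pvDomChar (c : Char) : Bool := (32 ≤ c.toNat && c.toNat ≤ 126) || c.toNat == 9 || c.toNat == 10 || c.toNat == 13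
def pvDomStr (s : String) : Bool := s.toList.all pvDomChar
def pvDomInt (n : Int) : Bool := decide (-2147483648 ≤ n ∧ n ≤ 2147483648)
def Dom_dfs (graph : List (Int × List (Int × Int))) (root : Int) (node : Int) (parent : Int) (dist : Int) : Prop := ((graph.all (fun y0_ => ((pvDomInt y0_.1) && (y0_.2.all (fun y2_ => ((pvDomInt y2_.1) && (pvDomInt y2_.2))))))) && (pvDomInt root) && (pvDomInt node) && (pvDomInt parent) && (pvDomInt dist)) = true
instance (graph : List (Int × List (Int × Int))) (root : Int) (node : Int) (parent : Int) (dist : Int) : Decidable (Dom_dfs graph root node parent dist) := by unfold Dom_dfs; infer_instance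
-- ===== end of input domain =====

-- ===== PORT A =====
-- B changes only the decomposition: A's recursive DFS becomes an explicit-stack loop; same sum.
-- Python dict lookup graph[node] (first match in insertion order; none = KeyError).
def glookup : List (Int × List (Int × Int)) → Int → Option (List (Int × Int))
  | [], _ => none
  | (k, v) :: rest, n => if k = n then some v else glookup rest n

-- total number of adjacency entries; fuel bound for the ports
def eSize (g : List (Int × List (Int × Int))) : Nat := (g.map (fun kv => kv.2.length)).sum

-- literal port of A's recursion, with a fuel counter (none = KeyError or fuel exhausted;
-- fuel eSize g + 1 bounds the recursion depth of every terminating run, see Pre_ below)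
mutual
def dfsA (g : List (Int × List (Int × Int))) (f : Nat) (n p d : Int) : Option Int :=
  match f with
  | 0 => none
  | f' + 1 =>
    match glookup g n with
    | none => none
    | some adj => dfsAList g f' adj n p d
termination_by (f, 0)

-- the 'for child, w in graph[node]' loop of A, accumulating total left to right
def dfsAList (g : List (Int × List (Int × Int))) (f : Nat) (adj : List (Int × Int)) (n p d : Int) : Option Int :=
  match adj with
  | [] => some 0
  | (c, w) :: rest =>
    if c = p then dfsAList g f rest n p d
    else
      match dfsA g f c n (max d w) with
      | none => none
      | some v =>
        match dfsAList g f rest n p d with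
        | none => none
        | some t => some (max d w + v + t)
termination_by (f, adj.length + 1)
end

def dfs (graph : List (Int × List (Int × Int))) (root : Int) (node : Int) (parent : Int) (dist : Int) : Int :=
  (dfsA graph (eSize graph + 1) node parent dist).getD 0

-- ===== PORT B =====
-- the inner 'for child, w in graph[cur]' loop of Source B: pushes kept children, adds their new dists
def pushChildren (adj : List (Int × Int)) (cur par d : Int)
    (stack : List (Int × Int × Int)) (total : Int) : List (Int × Int × Int) × Int :=
  match adj with
  | [] => (stack, total)
  | (c, w) :: rest =>
    if c = par then pushChildren rest cur par d stack total
    else pushChildren rest cur par d ((c, cur, max d w) :: stack) (total + max d w)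

-- the 'while stack' loop of Source B, with a fuel counter bounding the number of pops
def runB (g : List (Int × List (Int × Int))) (f : Nat)
    (stack : List (Int × Int × Int)) (total : Int) : Option Int :=
  match f, stack with
  | _, [] => some total
  | 0, _ :: _ => none
  | f' + 1, (cur, par, d) :: rest =>
    match glookup g cur with
    | none => none
    | some adj =>
      let st := pushChildren adj cur par d rest total
      runB g f' st.1 st.2

-- (eSize g + 1)^(eSize g + 1) bounds the total number of pops of every terminating run
def bFuel (g : List (Int × List (Int × Int))) : Nat := (eSize g + 1) ^ (eSize g + 1)

def dfs_alt (graph : List (Int × List (Int × Int))) (root : Int) (node : Int) (parent : Int) (dist : Int) : Int :=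
  (runB graph (bFuel graph) [(node, parent, dist)] 0).getD 0

-- ===== PRECONDITION & SPEC =====
-- closed-form condition on the input graph: from state (node, parent), every DFS path stays on
-- dict keys and ends within depth eSize g + 1 (no reachable missing key, no reachable cycle).
-- By pigeonhole the (node, parent) states on a path of a terminating run are distinct and number
-- at most eSize g + 1, so this admits EVERY input on which the Python A returns; it excludes
-- exactly the inputs where A raises KeyError, or RecursionError / recurses forever (a cycle).
def okState (g : List (Int × List (Int × Int))) : Nat → Int → Int → Bool
  | 0, _, _ => false
  | d + 1, n, p => (List.lookup n g).any (fun adj => adj.all (fun cw => cw.1 == p || okState g d cw.1 n))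

def Pre_dfs (graph : List (Int × List (Int × Int))) (root : Int) (node : Int) (parent : Int) (dist : Int) : Prop :=
  okState graph (eSize graph + 1) node parent = true

instance (graph : List (Int × List (Int × Int))) (root : Int) (node : Int) (parent : Int) (dist : Int) : Decidable (Pre_dfs graph root node parent dist) := by
  unfold Pre_dfs; infer_instance

def pvWitness_dfs : (List (Int × List (Int × Int))) × Int × Int × Int × Int :=
  ([(0, [(1, 5), (2, 3)]), (1, [(0, 5)]), (2, [(0, 3)])], 0, 0, -1, 0)

def Spec_dfs (graph : List (Int × List (Int × Int))) (root : Int) (node : Int) (parent : Int) (dist : Int) (out : Int) : Prop := out = dfs_alt graph root node parent dist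
instance (graph : List (Int × List (Int × Int))) (root : Int) (node : Int) (parent : Int) (dist : Int) (out : Int) : Decidable (Spec_dfs graph root node parent dist out) := by unfold Spec_dfs; infer_instance

-- ===== CLAIM (what is proved, stated in full; the proofs are below) =====
def Claim_equal_dfs : Prop := ∀ (graph : List (Int × List (Int × Int))) (root : Int) (node : Int) (parent : Int) (dist : Int), Dom_dfs graph root node parent dist → Pre_dfs graph root node parent dist → Spec_dfs graph root node parent dist (dfs graph root node parent dist)

-- ===== LEMMAS AND PROOFS =====

-- ghost mirror of dfsA that also counts the pops (recursion-tree nodes) its run needs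
mutual
def sizeA (g : List (Int × List (Int × Int))) (f : Nat) (n p : Int) : Option Nat :=
  match f with
  | 0 => none
  | f' + 1 =>
    match glookup g n with
    | none => none
    | some adj => (sizeAList g f' adj n p).map (· + 1)
termination_by (f, 0)

def sizeAList (g : List (Int × List (Int × Int))) (f : Nat) (adj : List (Int × Int)) (n p : Int) : Option Nat :=
  match adj with
  | [] => some 0
  | (c, w) :: rest =>
    if c = p then sizeAList g f rest n p
    else
      match sizeA g f c n with
      | none => none
      | some s =>
        match sizeAList g f rest n p with
        | none => none
        | some t => some (s + t)
termination_by (f, adj.length + 1)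
end

lemma glookup_length_le (g : List (Int × List (Int × Int))) (n : Int) (adj : List (Int × Int))
    (h : glookup g n = some adj) : adj.length ≤ eSize g := by
  induction g with
  | nil => simp [glookup] at h
  | cons kv rest ih =>
    obtain ⟨k, v⟩ := kv
    by_cases hk : k = n
    · simp [glookup, hk] at h
      subst h
      simp [eSize]
    · simp [glookup, hk] at h
      have := ih h
      simp [eSize] at this ⊢
      omega

lemma glookup_eq_lookup (g : List (Int × List (Int × Int))) (n : Int) :
    glookup g n = List.lookup n g := by
  induction g with
  | nil => simp [glookup]
  | cons kv rest ih =>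
    obtain ⟨k, v⟩ := kv
    rw [glookup, List.lookup]
    by_cases hk : k = n
    · simp [hk]
    · have hne : (n == k) = false := by simp [Ne.symm hk]
      simp [hk, hne, ih]

-- okState implies A's recursion returns a value, with a size obeying the geometric bound
lemma ok_sound (g : List (Int × List (Int × Int))) :
    ∀ f n p d, okState g f n p = true →
      ∃ v s, dfsA g f n p d = some v ∧ sizeA g f n p = some s ∧
        1 ≤ s ∧ s ≤ (eSize g + 1) ^ f := by
  intro f
  induction f with
  | zero => intro n p d h; simp [okState] at h
  | succ f ih =>
    intro n p d h
    rw [okState] at h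
    cases hl0 : List.lookup n g with
    | none => rw [hl0] at h; exact absurd h (by simp)
    | some adj =>
      have hl : glookup g n = some adj := by rw [glookup_eq_lookup, hl0]
      rw [hl0] at h
      simp only [Option.any_some] at h
      have hall : ∀ cw ∈ adj, cw.1 = p ∨ okState g f cw.1 n = true := by
        intro cw hm
        have := (List.all_eq_true.mp h) cw hm
        simpa using this
      have hlist : ∀ adj', (∀ cw ∈ adj', cw.1 = p ∨ okState g f cw.1 n = true) →
          ∃ v s, dfsAList g f adj' n p d = some v ∧ sizeAList g f adj' n p = some s ∧
            s ≤ adj'.length * (eSize g + 1) ^ f := by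
        intro adj' hok
        induction adj' with
        | nil => exact ⟨0, 0, by simp [dfsAList, sizeAList]⟩
        | cons cw rest ihl =>
          obtain ⟨c, w⟩ := cw
          obtain ⟨v, s, hv, hs, hb⟩ := ihl (fun x hx => hok x (by simp [hx]))
          by_cases hc : c = p
          · refine ⟨v, s, ?_, ?_, ?_⟩
            · rw [dfsAList]; simp [hc, hv]
            · rw [sizeAList]; simp [hc, hs]
            · simpa using le_trans hb (Nat.mul_le_mul_right _ (by omega))
          · have hok' : okState g f c n = true := by
              have := hok (c, w) (by simp)
              simpa [hc] using this
            obtain ⟨vc, sc, hvc, hsc, hsc1, hscb⟩ := ih c n (max d w) hok'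
            refine ⟨max d w + vc + v, sc + s, ?_, ?_, ?_⟩
            · rw [dfsAList]; simp [hc, hvc, hv]
            · rw [sizeAList]; simp [hc, hsc, hs]
            · simp; calc sc + s ≤ (eSize g + 1) ^ f + rest.length * (eSize g + 1) ^ f := by omega
                _ = (rest.length + 1) * (eSize g + 1) ^ f := by ring
      obtain ⟨v, s, hv, hs, hb⟩ := hlist adj hall
      refine ⟨v, s + 1, ?_, ?_, by omega, ?_⟩
      · rw [dfsA]; simp [hl, hv]
      · rw [sizeA]; simp [hl, hs]
      · have hlen := glookup_length_le g n adj hl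
        have h1 : (1:Nat) ≤ (eSize g + 1) ^ f := Nat.one_le_pow _ _ (by omega)
        have h2 : adj.length * (eSize g + 1) ^ f ≤ eSize g * (eSize g + 1) ^ f :=
          Nat.mul_le_mul_right _ hlen
        have h3 : (eSize g + 1) ^ (f + 1) = eSize g * (eSize g + 1) ^ f + (eSize g + 1) ^ f := by
          ring
        omega

-- frame invariant: the frame's pending dfs value and pop count, at some fuel
def FOK (g : List (Int × List (Int × Int))) (fr : Int × Int × Int) (vs : Int × Nat) : Prop :=
  ∃ f, dfsA g f fr.1 fr.2.1 fr.2.2 = some vs.1 ∧ sizeA g f fr.1 fr.2.1 = some vs.2 ∧ 1 ≤ vs.2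

-- the for-loop lemma: pushing adj's kept children prepends frames carrying exactly the
-- child values/sizes of dfsAList/sizeAList, and adds their new dists to total
lemma pushChildren_spec (g : List (Int × List (Int × Int))) (f : Nat) :
    ∀ (adj : List (Int × Int)) (cur par d : Int) (stack : List (Int × Int × Int)) (total v : Int) (s : Nat),
      dfsAList g f adj cur par d = some v → sizeAList g f adj cur par = some s →
      ∃ (frames : List (Int × Int × Int)) (vss : List (Int × Nat)) (addt : Int),
        pushChildren adj cur par d stack total = (frames ++ stack, total + addt) ∧
        List.Forall₂ (FOK g) frames vss ∧
        addt + (vss.map (·.1)).sum = v ∧ (vss.map (·.2)).sum = s := by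
  intro adj
  induction adj with
  | nil =>
    intro cur par d stack total v s hv hs
    rw [dfsAList] at hv; rw [sizeAList] at hs
    simp at hv hs
    exact ⟨[], [], 0, by simp [pushChildren], List.Forall₂.nil, by simp [hv], by simp [hs]⟩
  | cons cw rest ihl =>
    obtain ⟨c, w⟩ := cw
    intro cur par d stack total v s hv hs
    by_cases hc : c = par
    · rw [dfsAList] at hv; rw [sizeAList] at hs
      simp [hc] at hv hs
      obtain ⟨frames, vss, addt, h1, h2, h3, h4⟩ := ihl cur par d stack total v s hv hs
      exact ⟨frames, vss, addt, by rw [pushChildren]; simp [hc, h1], h2, h3, h4⟩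
    · rw [dfsAList] at hv; rw [sizeAList] at hs
      simp [hc] at hv hs
      cases hvc : dfsA g f c cur (max d w) with
      | none => rw [hvc] at hv; simp at hv
      | some vc =>
        rw [hvc] at hv
        cases hvt : dfsAList g f rest cur par d with
        | none => rw [hvt] at hv; simp at hv
        | some t =>
          rw [hvt] at hv; simp at hv
          cases hsc : sizeA g f c cur with
          | none => rw [hsc] at hs; simp at hs
          | some sc =>
            rw [hsc] at hs
            cases hst : sizeAList g f rest cur par with
            | none => rw [hst] at hs; simp at hs
            | some st =>
              rw [hst] at hs; simp at hs
              have hsc1 : 1 ≤ sc := by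
                cases f with
                | zero => rw [sizeA] at hsc; simp at hsc
                | succ f' =>
                  rw [sizeA] at hsc
                  cases hl : glookup g c with
                  | none => rw [hl] at hsc; simp at hsc
                  | some a => rw [hl] at hsc; simp at hsc; omega
              obtain ⟨frames, vss, addt, h1, h2, h3, h4⟩ :=
                ihl cur par d ((c, cur, max d w) :: stack) (total + max d w) t st hvt hst
              refine ⟨frames ++ [(c, cur, max d w)], vss ++ [(vc, sc)], max d w + addt, ?_, ?_, ?_, ?_⟩
              · rw [pushChildren]; simp [hc, h1, add_assoc]
              · exact List.rel_append h2 (List.Forall₂.cons ⟨f, hvc, hsc, hsc1⟩ List.Forall₂.nil)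
              · simp; omega
              · simp; omega

-- the while-loop lemma: with enough fuel, the loop returns total plus the pending values
lemma runB_spec (g : List (Int × List (Int × Int))) :
    ∀ (fuel : Nat) (stack : List (Int × Int × Int)) (vss : List (Int × Nat)) (total : Int),
      List.Forall₂ (FOK g) stack vss → (vss.map (·.2)).sum ≤ fuel →
      runB g fuel stack total = some (total + (vss.map (·.1)).sum) := by
  intro fuel
  induction fuel with
  | zero =>
    intro stack vss total hf hle
    cases hf with
    | nil => simp [runB]
    | cons hfr hrest =>
      obtain ⟨f, _, _, h1⟩ := hfr
      simp at hle
      omega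
  | succ fuel ih =>
    intro stack vss total hf hle
    cases hf with
    | nil => simp [runB]
    | @cons fr vsp stack' vss' hfr hrest =>
      obtain ⟨cur, par, d⟩ := fr
      obtain ⟨v, s⟩ := vsp
      obtain ⟨f, hv, hs, hs1⟩ := hfr
      cases f with
      | zero => rw [dfsA] at hv; simp at hv
      | succ f' =>
        rw [dfsA] at hv; rw [sizeA] at hs
        cases hl : glookup g cur with
        | none => rw [hl] at hv; simp at hv
        | some adj =>
          rw [hl] at hv hs
          simp at hv hs
          obtain ⟨s0, hs0, hs0eq⟩ := hs
          obtain ⟨frames, vss'', addt, h1, h2, h3, h4⟩ :=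
            pushChildren_spec g f' adj cur par d stack' total v s0 hv hs0
          rw [runB]
          simp only [hl, h1]
          have hall : List.Forall₂ (FOK g) (frames ++ stack') (vss'' ++ vss') :=
            List.rel_append h2 hrest
          have hsum : ((vss'' ++ vss').map (·.2)).sum ≤ fuel := by
            simp at hle ⊢
            omega
          rw [ih (frames ++ stack') (vss'' ++ vss') (total + addt) hall hsum]
          congr 1
          simp
          omega

-- ===== VERDICT (by name: the statement is the Claim_ definition above) =====
theorem dfs_spec : Claim_equal_dfs := by
  intro graph root node parent dist _ hpre
  unfold Spec_dfs dfs dfs_alt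
  obtain ⟨v, s, hv, hs, hs1, hsb⟩ :=
    ok_sound graph (eSize graph + 1) node parent dist hpre
  have hrun : runB graph (bFuel graph) [(node, parent, dist)] 0 = some (0 + v) := by
    have := runB_spec graph (bFuel graph) [(node, parent, dist)] [(v, s)] 0
      (List.Forall₂.cons ⟨eSize graph + 1, hv, hs, hs1⟩ List.Forall₂.nil)
      (by simpa [bFuel] using hsb)
    simpa using this
  rw [hv, hrun]
  simp
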